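-- pv_equiv track=rewrite | github.com/HZreal/Python-scenery | test_dir/demo.py | get_target_count
-- ===== SOURCE A (Python) =====
-- def get_target_count(arr: list):
--     num = 0
--     temp = []
--     for i in arr:
--         if (2018 - i) in arr:
--             temp.append(2018 - i)
--         if i not in temp:
--             num += 1
--     return num
-- ===== SOURCE B (Python) =====
-- def get_target_count(arr: list):
--     first = {}
--     for j, v in enumerate(arr):
--         if v not in first:
--             first[v] = j
--     num = 0
--     for j, v in enumerate(arr):
--         c = 2018 - v
--         if c not in first or first[c] > j:
--             num += 1
--     return num
-- ===== Notes on version B (the rewrite author's own statement) =====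
-- stated objective: faster
-- what changed: Replaces A's single pass that grows a temp list and scans both arr and temp per element with two passes: a dict of first-occurrence indices built once, then a positional comparison per element.
import Mathlib
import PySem

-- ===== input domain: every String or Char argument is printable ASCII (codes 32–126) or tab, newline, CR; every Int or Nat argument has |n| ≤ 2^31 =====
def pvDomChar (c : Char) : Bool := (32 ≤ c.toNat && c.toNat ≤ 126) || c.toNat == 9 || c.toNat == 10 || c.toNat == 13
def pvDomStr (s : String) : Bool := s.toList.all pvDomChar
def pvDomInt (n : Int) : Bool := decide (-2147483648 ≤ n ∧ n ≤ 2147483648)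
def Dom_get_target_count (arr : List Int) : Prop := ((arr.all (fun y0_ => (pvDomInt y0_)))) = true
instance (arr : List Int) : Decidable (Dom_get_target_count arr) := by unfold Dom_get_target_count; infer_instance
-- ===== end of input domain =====

-- B replaces A's growing temp list with a first-occurrence index dict built once,
-- then one positional-comparison pass (faster: the per-element scans of arr/temp disappear).

-- ===== PORT A =====
def get_target_count (arr : List Int) : Int :=
  (arr.foldl
    (fun (s : Int × List Int) i =>
      let temp := if arr.contains (2018 - i) then s.2 ++ [2018 - i] else s.2
      (if temp.contains i then s.1 else s.1 + 1, temp))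
    (0, [])).1

-- ===== PORT B =====
def get_target_count_alt (arr : List Int) : Int :=
  let first := (PySem.List.enumerate arr).foldl
      (fun (d : PySem.Dict Int Int) p =>
        if d.contains p.2 then d else d.insert p.2 p.1)
      PySem.Dict.empty
  (PySem.List.enumerate arr).foldl
      (fun num p =>
        match first.get? (2018 - p.2) with
        | none => num + 1
        | some k => if p.1 < k then num + 1 else num)
      0

-- ===== PRECONDITION & SPEC =====
def Spec_get_target_count (arr : List Int) (out : Int) : Prop := out = get_target_count_alt arr
instance (arr : List Int) (out : Int) : Decidable (Spec_get_target_count arr out) := by unfold Spec_get_target_count; infer_instance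

-- ===== CLAIM (what is proved, stated in full; the proofs are below) =====
def Claim_equal_get_target_count : Prop := ∀ (arr : List Int), Dom_get_target_count arr → Spec_get_target_count arr (get_target_count arr)

-- ===== LEMMAS AND PROOFS =====

/-- Reference count: process `l` given the prefix `pre` already seen; an element `x`
    is counted iff `2018 - x` does not occur in `pre ++ [x]`. -/
def pvAux : List Int → List Int → Int
  | [], _ => 0
  | x :: xs, pre =>
    (if (pre ++ [x]).contains (2018 - x) then 0 else 1) + pvAux xs (pre ++ [x])

/-- First index (counting from `s`) of `c` in `l`. -/
def pvFirstIdx? : List Int → Int → Int → Option Int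
  | [], _, _ => none
  | x :: xs, s, c => if x = c then some s else pvFirstIdx? xs (s + 1) c

lemma pvFirstIdx?_ge : ∀ (l : List Int) (s c k : Int),
    pvFirstIdx? l s c = some k → s ≤ k := by
  intro l
  induction l with
  | nil => intro s c k h; simp [pvFirstIdx?] at h
  | cons x xs ih =>
    intro s c k h
    by_cases hx : x = c
    · simp [pvFirstIdx?, hx] at h; omega
    · simp [pvFirstIdx?, hx] at h
      have := ih (s + 1) c k h; omega

lemma pvFirstIdx?_take : ∀ (l : List Int) (s c : Int) (n : Nat),
    (c ∈ l.take n) ↔ ∃ k, pvFirstIdx? l s c = some k ∧ k < s + n := by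
  intro l
  induction l with
  | nil => intro s c n; simp [pvFirstIdx?]
  | cons x xs ih =>
    intro s c n
    cases n with
    | zero =>
      simp only [List.take_zero, List.not_mem_nil, false_iff]
      rintro ⟨k, hk, hlt⟩
      have := pvFirstIdx?_ge (x :: xs) s c k hk; omega
    | succ m =>
      by_cases hx : x = c
      · subst hx
        constructor
        · intro _
          refine ⟨s, ?_, by omega⟩
          simp [pvFirstIdx?]
        · intro _
          simp
      · simp only [List.take_succ_cons, List.mem_cons, pvFirstIdx?, if_neg hx]
        rw [ih (s + 1) c m]
        constructor
        · rintro (h | ⟨k, hk, hlt⟩)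
          · exact absurd h.symm hx
          · exact ⟨k, hk, by omega⟩
        · rintro ⟨k, hk, hlt⟩
          right; exact ⟨k, hk, by omega⟩

/-- The dict built by B's first pass is exactly the first-occurrence index map. -/
lemma pvFirst_get? : ∀ (l : List Int) (s : Int) (d : PySem.Dict Int Int) (c : Int),
    ((PySem.List.enumerate l s).foldl
        (fun (d : PySem.Dict Int Int) p =>
          if d.contains p.2 then d else d.insert p.2 p.1) d).get? c =
      if d.contains c then d.get? c else pvFirstIdx? l s c := by
  intro l
  induction l with
  | nil =>
    intro s d c
    simp only [PySem.List.enumerate_nil, List.foldl_nil, pvFirstIdx?]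
    by_cases hc : d.contains c
    · simp [hc]
    · simp [hc, (PySem.Dict.get?_eq_none_iff_contains d c).mpr (by simpa using hc)]
  | cons x xs ih =>
    intro s d c
    rw [PySem.List.enumerate_cons, List.foldl_cons]
    by_cases hd : d.contains x
    · rw [if_pos hd, ih]
      by_cases hc : d.contains c
      · simp [hc]
      · simp only [hc, Bool.false_eq_true, if_false]
        have hx : x ≠ c := fun h => by subst h; rw [hd] at hc; exact hc rfl
        simp [pvFirstIdx?, hx]
    · rw [if_neg hd, ih]
      by_cases hxc : x = c
      · subst hxc
        have h1 : (d.insert x s).contains x = true := PySem.Dict.contains_insert_self d x s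
        rw [if_pos h1, if_neg hd, PySem.Dict.get?_insert_self]
        simp [pvFirstIdx?]
      · have hbc : (d.insert x s).contains c = d.contains c := by
          rw [PySem.Dict.contains_insert]
          simp [show (c == x) = false by simpa using fun h => hxc h.symm]
        rw [hbc]
        by_cases hc : d.contains c
        · simp only [hc, if_true]
          exact PySem.Dict.get?_insert_of_ne d s (Ne.symm hxc)
        · simp [hc, pvFirstIdx?, hxc]

/-- A's loop computes the reference count. -/
lemma pvA_loop (arr : List Int) : ∀ (l pre : List Int) (num : Int),
    (∀ x ∈ l, x ∈ arr) →
    ((l.foldl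
        (fun (s : Int × List Int) i =>
          let temp := if arr.contains (2018 - i) then s.2 ++ [2018 - i] else s.2
          (if temp.contains i then s.1 else s.1 + 1, temp))
        (num, (pre.filter (fun x => arr.contains (2018 - x))).map (fun x => 2018 - x))).1)
      = num + pvAux l pre := by
  intro l
  induction l with
  | nil => intro pre num _; simp [pvAux]
  | cons x xs ih =>
    intro pre num hsub
    have hxarr : x ∈ arr := hsub x (List.mem_cons_self ..)
    have hsub' : ∀ y ∈ xs, y ∈ arr := fun y hy => hsub y (List.mem_cons_of_mem _ hy)
    rw [List.foldl_cons]
    have htemp :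
        (if arr.contains (2018 - x)
          then (pre.filter (fun x => arr.contains (2018 - x))).map (fun x => 2018 - x) ++ [2018 - x]
          else (pre.filter (fun x => arr.contains (2018 - x))).map (fun x => 2018 - x))
        = ((pre ++ [x]).filter (fun x => arr.contains (2018 - x))).map (fun x => 2018 - x) := by
      by_cases h : (2018 - x) ∈ arr <;> simp [List.filter_append, h]
    have hmem :
        (((pre ++ [x]).filter (fun x => arr.contains (2018 - x))).map
            (fun x => 2018 - x)).contains x
          = (pre ++ [x]).contains (2018 - x) := by
      simp only [List.contains_eq_mem, List.mem_map, List.mem_filter, decide_eq_decide,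
        decide_eq_true_eq]
      constructor
      · rintro ⟨y, ⟨hy, _⟩, hyx⟩
        have : y = 2018 - x := by omega
        subst this; exact hy
      · intro h
        exact ⟨2018 - x, ⟨h, by simpa using hxarr⟩, by ring⟩
    simp only [htemp, hmem]
    by_cases hc : (pre ++ [x]).contains (2018 - x)
    · rw [if_pos hc, ih (pre ++ [x]) num hsub']
      simp only [pvAux]
      rw [if_pos hc]
      ring
    · rw [if_neg hc, ih (pre ++ [x]) (num + 1) hsub']
      simp only [pvAux]
      rw [if_neg hc]
      ring

/-- B's second pass computes the reference count. -/
lemma pvB_loop (arr : List Int) : ∀ (l pre : List Int) (num : Int),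
    arr = pre ++ l →
    ((PySem.List.enumerate l (pre.length : Int)).foldl
        (fun num p =>
          match pvFirstIdx? arr 0 (2018 - p.2) with
          | none => num + 1
          | some k => if p.1 < k then num + 1 else num)
        num)
      = num + pvAux l pre := by
  intro l
  induction l with
  | nil => intro pre num _; simp [PySem.List.enumerate_nil, pvAux]
  | cons x xs ih =>
    intro pre num harr
    rw [PySem.List.enumerate_cons, List.foldl_cons]
    have htake : arr.take (pre.length + 1) = pre ++ [x] := by
      subst harr
      have h1 : pre ++ x :: xs = (pre ++ [x]) ++ xs := by simp
      rw [h1]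
      have h2 : pre.length + 1 = (pre ++ [x]).length := by simp
      rw [h2, List.take_left]
    have hkey : (2018 - x ∈ pre ++ [x]) ↔
        ∃ k, pvFirstIdx? arr 0 (2018 - x) = some k ∧ k < (pre.length : Int) + 1 := by
      rw [← htake]
      simpa using pvFirstIdx?_take arr 0 (2018 - x) (pre.length + 1)
    have hnext : ((pre.length : Int) + 1) = ((pre ++ [x]).length : Int) := by
      simp
    have hstep :
        (match pvFirstIdx? arr 0 (2018 - x) with
          | none => num + 1
          | some k => if (pre.length : Int) < k then num + 1 else num)
        = num + (if (pre ++ [x]).contains (2018 - x) then 0 else 1) := by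
      cases hfi : pvFirstIdx? arr 0 (2018 - x) with
      | none =>
        have : ¬ (2018 - x ∈ pre ++ [x]) := by
          rw [hkey]; rintro ⟨k, hk, _⟩; rw [hfi] at hk; simp at hk
        simp [List.contains_eq_mem, this]
      | some k =>
        by_cases hlt : (pre.length : Int) < k
        · have : ¬ (2018 - x ∈ pre ++ [x]) := by
            rw [hkey]; rintro ⟨k', hk', hlt'⟩
            rw [hfi] at hk'; injection hk' with h; omega
          simp [hlt, List.contains_eq_mem, this]
        · have : 2018 - x ∈ pre ++ [x] := by
            rw [hkey]; exact ⟨k, hfi, by omega⟩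
          simp [hlt, List.contains_eq_mem, this]
    rw [hstep, hnext, ih (pre ++ [x]) _ (by simpa using harr)]
    simp only [pvAux]
    ring

/-- B's port, with the dict lookup replaced by its characterisation. -/
lemma pvB_eq (arr : List Int) :
    get_target_count_alt arr
      = (PySem.List.enumerate arr).foldl
          (fun num p =>
            match pvFirstIdx? arr 0 (2018 - p.2) with
            | none => num + 1
            | some k => if p.1 < k then num + 1 else num)
          0 := by
  unfold get_target_count_alt
  apply PySem.List.foldl_congr_mem
  intro num p _
  rw [pvFirst_get? arr 0 PySem.Dict.empty (2018 - p.2)]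
  simp

-- ===== VERDICT (by name: the statement is the Claim_ definition above) =====
theorem get_target_count_spec : Claim_equal_get_target_count := by
  intro arr _
  unfold Spec_get_target_count get_target_count
  have hA := pvA_loop arr arr [] 0 (fun x hx => hx)
  simp only [List.filter_nil, List.map_nil] at hA
  rw [hA, pvB_eq arr]
  have hB := pvB_loop arr arr [] 0 (by simp)
  simp only [List.length_nil, Int.natCast_zero] at hB
  rw [hB]
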